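-- pv_equiv track=rewrite | github.com/Sankalp43/pdsa | dfs.py | dfsglobal
-- ===== SOURCE A (Python) =====
-- def dfsglobal(Alist , snode):
--     visited = {}
--     parent = {}
--
--     def dfsInitListGlobal(Alist):
--         for i in Alist:
--             visited[i] = False
--             parent[i] = -1
--         return
--
--     def dfsListGlobal(Alist , snode):
--         visited[snode] = True
--         for j in Alist[snode]:
--             if(not visited[j]):
--                 parent[j] = snode
--                 dfsListGlobal(Alist , j)
--         return
--
--     dfsInitListGlobal(Alist)
--     dfsListGlobal(Alist , snode)
--     return visited , parent
-- ===== SOURCE B (Python) =====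
-- def dfsglobal(Alist, snode):
--     # Iterative DFS with an explicit stack of (node, iterator) frames;
--     # reproduces A's preorder and parent assignments exactly (return value only).
--     visited = {}
--     parent = {}
--     for i in Alist:
--         visited[i] = False
--         parent[i] = -1
--     visited[snode] = True
--     stack = [(snode, iter(Alist[snode]))]
--     while stack:
--         node, it = stack[-1]
--         for j in it:
--             if not visited[j]:
--                 parent[j] = node
--                 visited[j] = True
--                 stack.append((j, iter(Alist[j])))
--                 break
--         else:
--             stack.pop()
--     return visited, parent
-- ===== Notes on version B (the rewrite author's own statement) =====
-- stated objective: alternative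
-- what changed: A's nested recursive DFS helper is replaced by an iterative DFS over an explicit stack of (node, neighbour-iterator) frames, producing the identical preorder, visited and parent maps without recursion.
import Mathlib
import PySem

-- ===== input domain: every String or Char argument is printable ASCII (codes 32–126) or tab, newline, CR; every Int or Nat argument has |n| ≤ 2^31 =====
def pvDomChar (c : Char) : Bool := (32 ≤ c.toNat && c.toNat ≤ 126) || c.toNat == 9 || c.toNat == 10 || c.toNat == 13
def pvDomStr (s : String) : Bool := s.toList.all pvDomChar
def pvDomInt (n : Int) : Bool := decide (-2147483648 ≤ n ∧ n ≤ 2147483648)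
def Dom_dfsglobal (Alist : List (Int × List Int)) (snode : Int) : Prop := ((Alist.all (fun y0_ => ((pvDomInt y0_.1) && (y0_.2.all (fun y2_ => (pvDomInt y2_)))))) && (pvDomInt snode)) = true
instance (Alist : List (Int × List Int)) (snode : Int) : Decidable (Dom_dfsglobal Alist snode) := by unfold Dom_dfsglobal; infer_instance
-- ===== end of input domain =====

-- B replaces A's nested recursive DFS helper by an iterative DFS over an explicit
-- stack of (node, remaining-neighbours) frames (objective: alternative decomposition);
-- equivalence is about the RETURN value (A mutates only its own local dicts).

-- shared small helpers (both Pythons build the same dicts the same way)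
def pvAdj (ad : PySem.Dict Int (List Int)) (j : Int) : List Int := ad.getD j []

def pvInit (ad : PySem.Dict Int (List Int)) :
    PySem.Dict Int Bool × PySem.Dict Int Int :=
  ad.keys.foldl (fun st i => (st.1.insert i false, st.2.insert i (-1)))
    (PySem.Dict.empty, PySem.Dict.empty)

-- number of still-unvisited entries of the visited dict (termination measure / fuel bound)
def pvCountFalse (d : PySem.Dict Int Bool) : Nat :=
  d.items.countP (fun p => !p.2)

-- lemmas the ports need for termination / fuel sizing (cited by the definitions below)
theorem pvCountP_maprep_le (l : List (Int × Bool)) (j : Int) :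
    (l.map (fun p => if p.1 == j then (j, true) else p)).countP (fun p => !p.2)
      ≤ l.countP (fun p => !p.2) := by
  rw [List.countP_map]
  apply List.countP_mono_left
  intro a _ h
  by_cases hj : a.1 = j
  · simp [hj] at h
  · simpa [hj] using h

theorem pvCountP_maprep_lt (l : List (Int × Bool)) (j : Int)
    (h : (j, false) ∈ l) :
    (l.map (fun p => if p.1 == j then (j, true) else p)).countP (fun p => !p.2)
      < l.countP (fun p => !p.2) := by
  induction l with
  | nil => simp at h
  | cons p t ih =>
    simp only [List.map_cons, List.countP_cons]
    by_cases h1 : p = (j, false)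
    · subst h1
      have hle := pvCountP_maprep_le t j
      rw [List.countP_map] at hle
      norm_num at hle ⊢
      omega
    · have hmem : (j, false) ∈ t := by
        rcases List.mem_cons.mp h with h2 | h2
        · exact absurd h2.symm h1
        · exact h2
      have heq : (!(if p.1 == j then ((j : Int), true) else p).2) = (!p.2) := by
        by_cases hj : p.1 = j
        · have hpt : p.2 = true := by
            cases hb : p.2
            · exact absurd (Prod.ext hj hb) h1
            · rfl
          simp [hj, hpt]
        · simp [hj]
      rw [heq]
      have := ih hmem
      omega

theorem pvCountFalse_insert_true_lt (d : PySem.Dict Int Bool) (j : Int)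
    (h : d.getD j true = false) :
    pvCountFalse (d.insert j true) < pvCountFalse d := by
  have hget : d.get? j = some false := by
    rw [PySem.Dict.getD_eq_get?_getD] at h
    cases hg : d.get? j with
    | none => rw [hg] at h; simp at h
    | some b =>
      rw [hg] at h
      simp only [Option.getD_some] at h
      exact congrArg some h
  have hmem : (j, false) ∈ d.items := PySem.Dict.mem_items_of_get?_eq_some d hget
  have hcon : d.contains j = true := by
    rw [PySem.Dict.contains_eq_isSome_get?, hget]; rfl
  unfold pvCountFalse
  rw [PySem.Dict.items_insert, if_pos hcon]
  exact pvCountP_maprep_lt d.items j hmem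

-- fuel bound ingredient: the longest adjacency list stored in the dict
def pvMaxAdj (ad : PySem.Dict Int (List Int)) : Nat :=
  ad.values.foldl (fun m l => max m l.length) 0

-- size of the frame stack (second termination component of B's loop)
def pvStackSize (stack : List (Int × List Int)) : Nat :=
  (stack.map (fun p => p.2.length + 1)).sum

-- ===== PORT A =====
-- A's inner recursive helper dfsListGlobal, as the loop over the neighbour list js of
-- `node` (visited[node] was just set by the caller).  The fuel argument is ONLY a
-- totality guard (it is sized generously at the call site and never runs out there);
-- visited[j] is ported as getD j true: inside Pre_ every j is a key, so the default
-- (where Python raises KeyError) is never read.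
def dfsGoF (ad : PySem.Dict Int (List Int)) :
    Nat → Int → List Int → PySem.Dict Int Bool × PySem.Dict Int Int →
    PySem.Dict Int Bool × PySem.Dict Int Int
  | 0, _, _, st => st
  | _ + 1, _, [], st => st
  | f + 1, node, j :: rest, st =>
    if st.1.getD j true = false then
      -- parent[j] = node, then dfsListGlobal(Alist, j): visited[j] = True and recurse
      dfsGoF ad f node rest
        (dfsGoF ad f j (pvAdj ad j) (st.1.insert j true, st.2.insert j node))
    else
      dfsGoF ad f node rest st

def dfsglobal (Alist : List (Int × List Int)) (snode : Int) :
    (List (Int × Bool)) × (List (Int × Int)) :=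
  let ad := PySem.Dict.ofList Alist
  let st0 := pvInit ad                                  -- dfsInitListGlobal
  let st1 := (st0.1.insert snode true, st0.2)           -- visited[snode] = True
  let fuel := (ad.size + 1) * (pvMaxAdj ad + 2) + 1     -- totality guard, never exhausted
  let st2 := dfsGoF ad fuel snode (pvAdj ad snode) st1  -- dfsListGlobal(Alist, snode)
  (st2.1.items, st2.2.items)

-- ===== PORT B =====
-- Source B's while-loop over the explicit stack of (node, remaining-iterator) frames.
def iterLoop (ad : PySem.Dict Int (List Int)) :
    List (Int × List Int) → PySem.Dict Int Bool × PySem.Dict Int Int →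
    PySem.Dict Int Bool × PySem.Dict Int Int
  | [], st => st
  | (_, []) :: stack, st => iterLoop ad stack st        -- iterator exhausted: pop
  | (node, j :: rest) :: stack, st =>
    if h : st.1.getD j true = false then
      iterLoop ad ((j, pvAdj ad j) :: (node, rest) :: stack)
        (st.1.insert j true, st.2.insert j node)
    else
      iterLoop ad ((node, rest) :: stack) st
  termination_by stack st => (pvCountFalse st.1, pvStackSize stack)
  decreasing_by
  · exact Prod.Lex.right _ (by simp only [pvStackSize, List.map_cons, List.sum_cons, List.length_cons]; omega)
  · exact Prod.Lex.left _ _ (pvCountFalse_insert_true_lt _ _ h)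
  · exact Prod.Lex.right _ (by simp only [pvStackSize, List.map_cons, List.sum_cons, List.length_cons]; omega)

def dfsglobal_alt (Alist : List (Int × List Int)) (snode : Int) :
    (List (Int × Bool)) × (List (Int × Int)) :=
  let ad := PySem.Dict.ofList Alist
  let st0 := pvInit ad
  let st1 := (st0.1.insert snode true, st0.2)
  let st2 := iterLoop ad [(snode, pvAdj ad snode)] st1
  (st2.1.items, st2.2.items)

-- ===== PRECONDITION & SPEC =====
-- Pre_: snode is a key of Alist and some set S of keys contains snode and is closed
-- under the adjacency lists (i.e. the part of the graph reachable from snode stays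
-- inside the keys); exactly there Python A returns normally — otherwise the traversal
-- meets a node that is not a key and raises KeyError.
def Pre_dfsglobal (Alist : List (Int × List Int)) (snode : Int) : Prop :=
  snode ∈ Alist.map Prod.fst ∧
    ∃ S ∈ (Alist.map Prod.fst).toFinset.powerset,
      snode ∈ S ∧ ∀ k ∈ S, ∀ j ∈ (PySem.Dict.ofList Alist).getD k [], j ∈ S
instance (Alist : List (Int × List Int)) (snode : Int) : Decidable (Pre_dfsglobal Alist snode) := by unfold Pre_dfsglobal; infer_instance

def pvWitness_dfsglobal : (List (Int × List Int)) × Int := ([(0, [1, 2]), (1, [0]), (2, [])], 0)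

def Spec_dfsglobal (Alist : List (Int × List Int)) (snode : Int) (out : (List (Int × Bool)) × (List (Int × Int))) : Prop := out = dfsglobal_alt Alist snode
instance (Alist : List (Int × List Int)) (snode : Int) (out : (List (Int × Bool)) × (List (Int × Int))) : Decidable (Spec_dfsglobal Alist snode out) := by unfold Spec_dfsglobal; infer_instance

-- ===== CLAIM (what is proved, stated in full; the proofs are below) =====
def Claim_equal_dfsglobal : Prop := ∀ (Alist : List (Int × List Int)) (snode : Int), Dom_dfsglobal Alist snode → Pre_dfsglobal Alist snode → Spec_dfsglobal Alist snode (dfsglobal Alist snode)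

-- ===== LEMMAS AND PROOFS =====

theorem pvCountFalse_insert_true_le (d : PySem.Dict Int Bool) (j : Int) :
    pvCountFalse (d.insert j true) ≤ pvCountFalse d := by
  unfold pvCountFalse
  rw [PySem.Dict.items_insert]
  split
  · exact pvCountP_maprep_le d.items j
  · simp [List.countP_append]

theorem pvLe_foldl_max_acc (ls : List (List Int)) (acc : Nat) :
    acc ≤ ls.foldl (fun m l => max m l.length) acc := by
  induction ls generalizing acc with
  | nil => simp
  | cons x t ih => exact le_trans (le_max_left _ _) (ih (max acc x.length))

theorem pvLe_foldl_max (ls : List (List Int)) (acc : Nat) (l : List Int)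
    (h : l ∈ ls) : l.length ≤ ls.foldl (fun m x => max m x.length) acc := by
  induction ls generalizing acc with
  | nil => simp at h
  | cons x t ih =>
    rcases List.mem_cons.mp h with h1 | h1
    · subst h1; exact le_trans (le_max_right _ _) (pvLe_foldl_max_acc t _)
    · exact ih (max acc x.length) h1

theorem pvAdj_le_maxAdj (ad : PySem.Dict Int (List Int)) (j : Int) :
    (pvAdj ad j).length ≤ pvMaxAdj ad := by
  unfold pvAdj pvMaxAdj
  rw [PySem.Dict.getD_eq_get?_getD]
  cases hg : ad.get? j with
  | none => simp
  | some v =>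
    have hmem : (j, v) ∈ ad.items := PySem.Dict.mem_items_of_get?_eq_some ad hg
    have hv : v ∈ ad.values := by
      simp only [PySem.Dict.values]
      exact List.mem_map_of_mem hmem
    simpa using pvLe_foldl_max ad.values 0 v hv

-- pvCountFalse never grows along A's recursion
theorem pvMono (ad : PySem.Dict Int (List Int)) (f : Nat) :
    ∀ (node : Int) (js : List Int) st,
      pvCountFalse (dfsGoF ad f node js st).1 ≤ pvCountFalse st.1 := by
  induction f with
  | zero => intro node js st; simp [dfsGoF]
  | succ f ih =>
    intro node js st
    cases js with
    | nil => simp [dfsGoF]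
    | cons j rest =>
      simp only [dfsGoF]
      split
      · calc pvCountFalse (dfsGoF ad f node rest
                (dfsGoF ad f j (pvAdj ad j) (st.1.insert j true, st.2.insert j node))).1
              ≤ pvCountFalse (dfsGoF ad f j (pvAdj ad j)
                  (st.1.insert j true, st.2.insert j node)).1 := ih _ _ _
          _ ≤ pvCountFalse (st.1.insert j true) := ih _ _ _
          _ ≤ pvCountFalse st.1 := pvCountFalse_insert_true_le _ _
      · exact ih _ _ _

-- simulation: one stack frame of B computes exactly A's recursive call
theorem pvSim (ad : PySem.Dict Int (List Int)) (f : Nat) :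
    ∀ (node : Int) (js : List Int) (stack : List (Int × List Int)) st,
      pvCountFalse st.1 * (pvMaxAdj ad + 2) + js.length < f →
      iterLoop ad ((node, js) :: stack) st = iterLoop ad stack (dfsGoF ad f node js st) := by
  induction f with
  | zero => intro node js stack st h; omega
  | succ f ih =>
    intro node js stack st h
    cases js with
    | nil => simp [iterLoop, dfsGoF]
    | cons j rest =>
      rw [iterLoop]
      simp only [dfsGoF]
      split
      · rename_i hg
        have hlt := pvCountFalse_insert_true_lt st.1 j hg
        set st2 := (st.1.insert j true, st.2.insert j node) with hst2
        have hc2 : pvCountFalse st2.1 + 1 ≤ pvCountFalse st.1 := by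
          simpa [hst2] using hlt
        have hb1 : pvCountFalse st2.1 * (pvMaxAdj ad + 2) + (pvAdj ad j).length < f := by
          have hadj := pvAdj_le_maxAdj ad j
          have hmul : pvCountFalse st2.1 * (pvMaxAdj ad + 2) + (pvMaxAdj ad + 2)
              ≤ pvCountFalse st.1 * (pvMaxAdj ad + 2) := by
            have := Nat.mul_le_mul_right (pvMaxAdj ad + 2) hc2
            rwa [add_mul, one_mul] at this
          simp only [List.length_cons] at h
          linarith
        rw [ih j (pvAdj ad j) ((node, rest) :: stack) st2 hb1]
        have hb2 : pvCountFalse (dfsGoF ad f j (pvAdj ad j) st2).1 * (pvMaxAdj ad + 2)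
            + rest.length < f := by
          have hm := pvMono ad f j (pvAdj ad j) st2
          have hmul : pvCountFalse (dfsGoF ad f j (pvAdj ad j) st2).1 * (pvMaxAdj ad + 2)
              + (pvMaxAdj ad + 2) ≤ pvCountFalse st.1 * (pvMaxAdj ad + 2) := by
            have := Nat.mul_le_mul_right (pvMaxAdj ad + 2)
              (show pvCountFalse (dfsGoF ad f j (pvAdj ad j) st2).1 + 1
                  ≤ pvCountFalse st.1 by omega)
            rwa [add_mul, one_mul] at this
          simp only [List.length_cons] at h
          linarith
        exact ih node rest stack _ hb2
      · exact ih node rest stack st (by simp only [List.length_cons] at h; omega)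

-- the initialisation loop creates at most one dict entry per key
theorem pvInit_size_le (keys : List Int) (st : PySem.Dict Int Bool × PySem.Dict Int Int) :
    (keys.foldl (fun st i => (st.1.insert i false, st.2.insert i (-1))) st).1.size
      ≤ st.1.size + keys.length := by
  induction keys generalizing st with
  | nil => simp
  | cons k t ih =>
    refine le_trans (ih _) ?_
    have : (st.1.insert k false).size ≤ st.1.size + 1 := by
      rw [PySem.Dict.size_insert]; split <;> omega
    simp only [List.length_cons]; omega

theorem pvCountFalse_le_size (d : PySem.Dict Int Bool) : pvCountFalse d ≤ d.size := by
  unfold pvCountFalse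
  simpa [PySem.Dict.size] using List.countP_le_length (l := d.items) (p := fun p => !p.2)

-- ===== VERDICT (by name: the statement is the Claim_ definition above) =====
theorem dfsglobal_spec : Claim_equal_dfsglobal := by
  intro Alist snode _ _
  unfold Spec_dfsglobal dfsglobal dfsglobal_alt
  simp only
  set ad := PySem.Dict.ofList Alist with had
  set st0 := pvInit ad with hst0
  set st1 := (st0.1.insert snode true, st0.2) with hst1
  have hc : pvCountFalse st1.1 ≤ ad.size := by
    have h1 : pvCountFalse st1.1 ≤ pvCountFalse st0.1 :=
      pvCountFalse_insert_true_le _ _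
    have h2 : pvCountFalse st0.1 ≤ st0.1.size := pvCountFalse_le_size _
    have h3 : st0.1.size ≤ ad.size := by
      have := pvInit_size_le ad.keys (PySem.Dict.empty, PySem.Dict.empty)
      simpa [hst0, pvInit, PySem.Dict.size, PySem.Dict.keys, PySem.Dict.empty] using this
    omega
  have hbound : pvCountFalse st1.1 * (pvMaxAdj ad + 2) + (pvAdj ad snode).length
      < (ad.size + 1) * (pvMaxAdj ad + 2) + 1 := by
    have hadj := pvAdj_le_maxAdj ad snode
    have hmul : pvCountFalse st1.1 * (pvMaxAdj ad + 2) ≤ ad.size * (pvMaxAdj ad + 2) :=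
      Nat.mul_le_mul_right _ hc
    have hexp : (ad.size + 1) * (pvMaxAdj ad + 2)
        = ad.size * (pvMaxAdj ad + 2) + (pvMaxAdj ad + 2) := by ring
    linarith
  rw [pvSim ad ((ad.size + 1) * (pvMaxAdj ad + 2) + 1) snode (pvAdj ad snode) [] st1 hbound]
  rw [iterLoop]
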